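-- pv_equiv track=rewrite | github.com/Yescrypt/ProbeSuite | app/information_gathering/passive/waybackurls.py | filter_urls
-- ===== SOURCE A (Python) =====
-- def filter_urls(urls, keywords):
--     """URL'larni kalit so'zlar bo'yicha filtrlash (grep kabi)"""
--     if not keywords:
--         return urls
--
--     filtered = []
--     for url in urls:
--         url_lower = url.lower()
--
--         # Har bir keyword uchun tekshirish
--         for keyword in keywords:
--             kw_lower = keyword.lower()
--
--             # Agar keyword fayl kengaytmasi bo'lsa (.txt, .php, .config)
--             if kw_lower.startswith('.') and len(kw_lower) > 1:
--                 # URL oxirida bo'lishi kerak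
--                 if url_lower.endswith(kw_lower):
--                     filtered.append(url)
--                     break
--             # Agar keyword robots.txt, sitemap.xml kabi to'liq fayl nomi bo'lsa
--             elif '.' in kw_lower and not kw_lower.startswith('http'):
--                 # Fayl nomi URL'da biron joyda bo'lishi mumkin
--                 # Masalan: /robots.txt, /path/robots.txt, /username/robots.txt
--                 # Split qilib oxirgi qismini olish
--                 parts = url_lower.split('/')
--                 if kw_lower in parts:  # Aniq fayl nomi
--                     filtered.append(url)
--                     break
--                 # Yoki URL'da umuman mavjudmi
--                 elif kw_lower in url_lower:
--                     filtered.append(url)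
--                     break
--             # Oddiy so'z qidiruvi (admin, login, api)
--             else:
--                 if kw_lower in url_lower:
--                     filtered.append(url)
--                     break
--
--     return filtered
-- ===== SOURCE B (Python) =====
-- def filter_urls(urls, keywords):
--     """URL'larni kalit so'zlar bo'yicha filtrlash (grep kabi)"""
--     if not keywords:
--         return urls
--     matched = [False] * len(urls)
--     for keyword in keywords:
--         kw = keyword.lower()
--         if kw.startswith('.') and len(kw) > 1:
--             for i, url in enumerate(urls):
--                 matched[i] = matched[i] or url.lower().endswith(kw)
--         else:
--             for i, url in enumerate(urls):
--                 matched[i] = matched[i] or kw in url.lower()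
--     return [url for url, m in zip(urls, matched) if m]
-- ===== Notes on version B (the rewrite author's own statement) =====
-- stated objective: alternative
-- what changed: B inverts the loop nesting: it scans keyword-by-keyword, updating a boolean mask over the urls (extension keywords mark via endswith, all other keywords via a plain substring test, which subsumes A's redundant split('/')-parts check), and finally emits the urls whose mask bit is set; A instead loops url-by-url with a nested three-branch keyword loop and break.
import Mathlib
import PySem

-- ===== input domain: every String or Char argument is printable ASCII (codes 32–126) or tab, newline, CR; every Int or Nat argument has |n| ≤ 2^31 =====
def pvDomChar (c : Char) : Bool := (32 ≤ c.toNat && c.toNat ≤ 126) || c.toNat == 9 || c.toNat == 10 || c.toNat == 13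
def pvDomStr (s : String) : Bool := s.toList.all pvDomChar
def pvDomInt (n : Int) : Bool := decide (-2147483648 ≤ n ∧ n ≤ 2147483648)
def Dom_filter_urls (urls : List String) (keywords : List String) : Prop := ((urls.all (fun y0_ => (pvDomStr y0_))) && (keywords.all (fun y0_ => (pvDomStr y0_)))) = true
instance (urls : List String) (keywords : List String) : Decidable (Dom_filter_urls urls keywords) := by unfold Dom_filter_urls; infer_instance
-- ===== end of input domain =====

-- B inverts the loop nesting: a keyword-outer pass maintains a boolean mask over the urls
-- (substring test subsumes A's redundant split('/')-parts check), then emits the marked urls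
-- in order; A loops url-by-url with a nested three-branch keyword loop (objective: alternative).


-- ===== PORT A =====
-- A's inner 'for keyword in keywords: … break' loop: whether url gets appended
def filterUrlsAMatch (urlLower : String) : List String → Bool
  | [] => false
  | keyword :: rest =>
    let kwLower := PySem.Str.lower keyword
    if PySem.Str.startswith kwLower "." && decide (1 < PySem.Str.len kwLower) then
      if PySem.Str.endswith urlLower kwLower then true else filterUrlsAMatch urlLower rest
    else if PySem.Str.isIn "." kwLower && !PySem.Str.startswith kwLower "http" then
      -- url_lower.split('/'): the separator "/" is non-empty, so split? is always `some`
      let parts := (PySem.Str.split? urlLower "/").getD []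
      if parts.contains kwLower then true
      else if PySem.Str.isIn kwLower urlLower then true
      else filterUrlsAMatch urlLower rest
    else
      if PySem.Str.isIn kwLower urlLower then true else filterUrlsAMatch urlLower rest

def filter_urls (urls : List String) (keywords : List String) : List String :=
  if keywords = [] then urls
  else
    urls.foldl (fun filtered url =>
      if filterUrlsAMatch (PySem.Str.lower url) keywords then filtered ++ [url] else filtered) []

-- ===== PORT B =====
def filter_urls_alt (urls : List String) (keywords : List String) : List String :=
  if keywords = [] then urls
  else
    let matched := keywords.foldl (fun m keyword =>
      let kw := PySem.Str.lower keyword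
      if PySem.Str.startswith kw "." && decide (1 < PySem.Str.len kw) then
        -- for i, url in enumerate(urls): matched[i] = matched[i] or url.lower().endswith(kw)
        (urls.zip m).map (fun p => p.2 || PySem.Str.endswith (PySem.Str.lower p.1) kw)
      else
        -- for i, url in enumerate(urls): matched[i] = matched[i] or kw in url.lower()
        (urls.zip m).map (fun p => p.2 || PySem.Str.isIn kw (PySem.Str.lower p.1)))
      (List.replicate urls.length false)
    ((urls.zip matched).filter (fun p => p.2)).map (fun p => p.1)

-- ===== PRECONDITION & SPEC =====
def Spec_filter_urls (urls : List String) (keywords : List String) (out : List String) : Prop := out = filter_urls_alt urls keywords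
instance (urls : List String) (keywords : List String) (out : List String) : Decidable (Spec_filter_urls urls keywords out) := by unfold Spec_filter_urls; infer_instance

-- ===== CLAIM (what is proved, stated in full; the proofs are below) =====
def Claim_equal_filter_urls : Prop := ∀ (urls : List String) (keywords : List String), Dom_filter_urls urls keywords → Spec_filter_urls urls keywords (filter_urls urls keywords)

-- ===== LEMMAS AND PROOFS =====

-- the per-keyword test both programs reduce to
def kwTestL (kw u : String) : Bool :=
  if PySem.Str.startswith kw "." && decide (1 < PySem.Str.len kw)
  then PySem.Str.endswith (PySem.Str.lower u) kw
  else PySem.Str.isIn kw (PySem.Str.lower u)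

-- invariant of split's worker: every piece is an already-collected one or an infix of cur.reverse ++ l
theorem go_mem_infix (sep : List Char) :
    ∀ (fuel : Nat) (l cur : List Char) (acc : List (List Char)) (x : List Char),
      x ∈ PySem.Chars.splitOn.go sep fuel l cur acc → x ∈ acc ∨ x <:+: (cur.reverse ++ l) := by
  intro fuel
  induction fuel with
  | zero =>
    intro l cur acc x hx
    simp [PySem.Chars.splitOn.go] at hx
    rcases hx with h | h
    · exact Or.inl h
    · exact Or.inr (h ▸ List.infix_rfl)
  | succ n ih =>
    intro l cur acc x hx
    cases l with
    | nil =>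
      simp [PySem.Chars.splitOn.go] at hx
      rcases hx with h | h
      · exact Or.inl h
      · exact Or.inr (by simp [h])
    | cons c rest =>
      rw [PySem.Chars.splitOn.go] at hx
      by_cases hp : sep.isPrefixOf (c :: rest) = true
      · simp only [hp, if_true] at hx
        rcases ih _ _ _ _ hx with h | h
        · rcases List.mem_cons.mp h with h1 | h1
          · exact Or.inr (h1 ▸ ⟨[], c :: rest, by simp⟩)
          · exact Or.inl h1
        · refine Or.inr ?_
          simp only [List.reverse_nil, List.nil_append] at h
          exact h.trans ((List.drop_suffix _ _).trans (List.suffix_append cur.reverse _)).isInfix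
      · simp only [hp] at hx
        rcases ih _ _ _ _ hx with h | h
        · exact Or.inl h
        · refine Or.inr ?_
          simpa using h

-- every piece produced by Python's s.split(sep) occurs contiguously in s
theorem mem_splitOn_infix (s sep x : List Char) (hx : x ∈ PySem.Chars.splitOn s sep) : x <:+: s := by
  have := go_mem_infix sep (s.length + 1) s [] [] x (by simpa [PySem.Chars.splitOn] using hx)
  simpa using this

-- membership in url.split('/') is already a substring match: A's parts check is redundant
theorem mem_split_isIn (ul kw : String)
    (h : kw ∈ (PySem.Str.split? ul "/").getD []) : PySem.Str.isIn kw ul = true := by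
  have hsep : ("/" : String).toList = ['/'] := rfl
  rw [PySem.Str.split?] at h
  rw [PySem.Chars.split?] at h
  simp [hsep] at h
  rcases h with ⟨piece, hmem, hkw⟩
  have hinf := mem_splitOn_infix _ _ _ hmem
  rw [PySem.Str.isIn_iff_infix]
  have : kw.toList = piece := by rw [← hkw]; simp
  rw [this]; exact hinf

-- A's three-branch break loop collapses to one any over the per-keyword test
theorem aMatch_eq_any (url : String) (ks : List String) :
    filterUrlsAMatch (PySem.Str.lower url) ks
      = ks.any (fun k => kwTestL (PySem.Str.lower k) url) := by
  induction ks with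
  | nil => rfl
  | cons k rest ih =>
    simp only [filterUrlsAMatch, List.any_cons, ← ih]
    set kw := PySem.Str.lower k with hkw
    by_cases hext : (PySem.Str.startswith kw "." && decide (1 < PySem.Str.len kw)) = true
    · simp only [kwTestL, hext, if_true]
      cases PySem.Str.endswith (PySem.Str.lower url) kw <;> simp
    · simp only [kwTestL, hext]
      by_cases hf : (PySem.Str.isIn "." kw && !PySem.Str.startswith kw "http") = true
      · simp only [hf, if_true]
        by_cases hc : ((PySem.Str.split? (PySem.Str.lower url) "/").getD []).contains kw = true
        · have hin := mem_split_isIn (PySem.Str.lower url) kw (by simpa using hc)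
          simp
          exact fun _ => Or.inl (by simpa using hin)
        · simp only [Bool.not_eq_true] at hc
          simp only [hc]
          cases h2 : PySem.Str.isIn kw (PySem.Str.lower url) <;> simp
      · simp only [Bool.not_eq_true] at hf
        simp only [hf]
        cases h2 : PySem.Str.isIn kw (PySem.Str.lower url) <;> simp

-- zipping a list with a pointwise map of itself
theorem zip_map_self {α β : Type} (l : List α) (f : α → β) :
    l.zip (l.map f) = l.map (fun x => (x, f x)) := by
  induction l with
  | nil => rfl
  | cons x xs ih => simp [ih]

-- B's mask fold computes, at each position, the any of the per-keyword tests
theorem mask_fold (urls : List String) :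
    ∀ (ks : List String) (f : String → Bool),
      ks.foldl (fun m keyword =>
        let kw := PySem.Str.lower keyword
        if PySem.Str.startswith kw "." && decide (1 < PySem.Str.len kw) then
          (urls.zip m).map (fun p => p.2 || PySem.Str.endswith (PySem.Str.lower p.1) kw)
        else
          (urls.zip m).map (fun p => p.2 || PySem.Str.isIn kw (PySem.Str.lower p.1)))
        (urls.map f)
      = urls.map (fun u => f u || ks.any (fun k => kwTestL (PySem.Str.lower k) u)) := by
  intro ks
  induction ks with
  | nil => intro f; simp
  | cons k rest ih =>
    intro f
    rw [List.foldl_cons]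
    have hstep :
        (let kw := PySem.Str.lower k
         if PySem.Str.startswith kw "." && decide (1 < PySem.Str.len kw) then
           (urls.zip (urls.map f)).map (fun p => p.2 || PySem.Str.endswith (PySem.Str.lower p.1) kw)
         else
           (urls.zip (urls.map f)).map (fun p => p.2 || PySem.Str.isIn kw (PySem.Str.lower p.1)))
        = urls.map (fun u => f u || kwTestL (PySem.Str.lower k) u) := by
      simp only [kwTestL]
      split
      · rw [zip_map_self]; simp
      · rw [zip_map_self]; simp
    rw [hstep, ih]
    apply List.map_congr_left
    intro u _
    simp [Bool.or_assoc]

-- emitting the marked urls of a pointwise mask is a filter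
theorem zip_mask_filter (urls : List String) (g : String → Bool) :
    (((urls.zip (urls.map g)).filter (fun p => p.2)).map (fun p => p.1))
      = urls.filter g := by
  rw [zip_map_self]
  induction urls with
  | nil => rfl
  | cons u us ih =>
    by_cases hg : g u = true <;> simp [hg, ih]

-- ===== VERDICT (by name: the statement is the Claim_ definition above) =====
theorem filter_urls_spec : Claim_equal_filter_urls := by
  intro urls keywords _
  unfold Spec_filter_urls filter_urls filter_urls_alt
  by_cases hk : keywords = []
  · simp [hk]
  · simp only [hk, if_false]
    rw [PySem.List.foldl_append_if (fun url => filterUrlsAMatch (PySem.Str.lower url) keywords)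
        (fun url => url) urls []]
    simp only [List.nil_append, List.map_id']
    have hrep : List.replicate urls.length false = urls.map (fun _ => false) := by
      simp [List.map_const']
    rw [hrep, mask_fold, zip_mask_filter]
    apply List.filter_congr
    intro url _
    rw [aMatch_eq_any]
    simp
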